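-- pv_equiv track=rewrite | github.com/jamf/zecops_public | cfil_hash_collision/cfil_collision.py | _new_entry
-- ===== SOURCE A (Python) =====
-- def _new_entry(ip_hashes, laddr, faddr, lport, fport, ts):
--     if len(ip_hashes) == 0:
--         return True
--     for (laddr_p, faddr_p, lport_p, fport_p, _) in ip_hashes:
--         if (laddr_p, faddr_p, lport_p, fport_p) == (laddr, faddr, lport, fport):
--             continue
--         else:
--             return True
--     return False
-- ===== SOURCE B (Python) =====
-- def _new_entry(ip_hashes, laddr, faddr, lport, fport, ts):
--     n = len(ip_hashes)
--     keys = [entry[:4] for entry in ip_hashes]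
--     return n == 0 or keys.count((laddr, faddr, lport, fport)) < n
-- ===== Notes on version B (the rewrite author's own statement) =====
-- stated objective: alternative
-- what changed: B replaces A's early-return mismatch scan by a counting characterization in staged passes: project the 4-field keys, count occurrences of the target key with list.count, and return True iff the list is empty or that count is smaller than the length.
import Mathlib
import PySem

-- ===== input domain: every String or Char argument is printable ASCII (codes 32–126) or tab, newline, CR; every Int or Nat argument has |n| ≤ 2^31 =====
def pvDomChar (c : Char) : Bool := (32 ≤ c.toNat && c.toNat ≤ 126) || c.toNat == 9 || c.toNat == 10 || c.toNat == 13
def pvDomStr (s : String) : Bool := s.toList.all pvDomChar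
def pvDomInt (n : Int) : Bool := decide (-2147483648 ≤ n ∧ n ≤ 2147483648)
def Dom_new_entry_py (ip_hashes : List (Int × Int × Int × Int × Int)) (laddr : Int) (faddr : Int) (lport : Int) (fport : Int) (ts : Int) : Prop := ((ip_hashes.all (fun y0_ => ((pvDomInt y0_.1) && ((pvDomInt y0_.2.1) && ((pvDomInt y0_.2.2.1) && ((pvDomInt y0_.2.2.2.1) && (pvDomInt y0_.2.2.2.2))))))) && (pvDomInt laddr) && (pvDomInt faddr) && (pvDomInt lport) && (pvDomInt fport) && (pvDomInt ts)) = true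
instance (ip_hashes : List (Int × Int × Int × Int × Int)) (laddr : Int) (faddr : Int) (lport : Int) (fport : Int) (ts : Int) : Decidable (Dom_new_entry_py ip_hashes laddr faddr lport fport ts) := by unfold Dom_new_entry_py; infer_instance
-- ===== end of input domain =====

-- B replaces A's early-return mismatch scan by staged passes: project the 4-field keys, count the target key with list.count, compare the count to the length (alternative decomposition; same O(n) cost).

-- ===== PORT A =====
-- the for-loop of A: continue on a matching key, return True on the first mismatch, False when exhausted
def newEntryLoop (t : Int × Int × Int × Int) : List (Int × Int × Int × Int × Int) → Bool
  | [] => false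
  | (l, f, lp, fp, _) :: rest => if (l, f, lp, fp) = t then newEntryLoop t rest else true

def new_entry_py (ip_hashes : List (Int × Int × Int × Int × Int)) (laddr : Int) (faddr : Int) (lport : Int) (fport : Int) (ts : Int) : Bool :=
  if ip_hashes.length = 0 then true
  else newEntryLoop (laddr, faddr, lport, fport) ip_hashes

-- ===== PORT B =====
def new_entry_py_alt (ip_hashes : List (Int × Int × Int × Int × Int)) (laddr : Int) (faddr : Int) (lport : Int) (fport : Int) (ts : Int) : Bool :=
  let n : Int := ip_hashes.length
  let keys : List (Int × Int × Int × Int) := ip_hashes.map (fun e => (e.1, e.2.1, e.2.2.1, e.2.2.2.1))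
  n == 0 || decide ((PySem.List.count keys (laddr, faddr, lport, fport) : Int) < n)

-- ===== PRECONDITION & SPEC =====
def Spec_new_entry_py (ip_hashes : List (Int × Int × Int × Int × Int)) (laddr : Int) (faddr : Int) (lport : Int) (fport : Int) (ts : Int) (out : Bool) : Prop := out = new_entry_py_alt ip_hashes laddr faddr lport fport ts
instance (ip_hashes : List (Int × Int × Int × Int × Int)) (laddr : Int) (faddr : Int) (lport : Int) (fport : Int) (ts : Int) (out : Bool) : Decidable (Spec_new_entry_py ip_hashes laddr faddr lport fport ts out) := by unfold Spec_new_entry_py; infer_instance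

-- ===== CLAIM (what is proved, stated in full; the proofs are below) =====
def Claim_equal_new_entry_py : Prop := ∀ (ip_hashes : List (Int × Int × Int × Int × Int)) (laddr : Int) (faddr : Int) (lport : Int) (fport : Int) (ts : Int), Dom_new_entry_py ip_hashes laddr faddr lport fport ts → Spec_new_entry_py ip_hashes laddr faddr lport fport ts (new_entry_py ip_hashes laddr faddr lport fport ts)

-- ===== LEMMAS AND PROOFS =====

-- B's count test: the target's count is below the length exactly when some key differs
theorem count_target_lt_len_iff_not_all (keys : List (Int × Int × Int × Int)) (t : Int × Int × Int × Int) :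
    (decide ((keys.count t : Int) < keys.length)) = !(keys.all (· == t)) := by
  have hle := List.count_le_length (l := keys) (a := t)
  have hiff := List.count_eq_length (l := keys) (a := t)
  rw [Bool.eq_iff_iff]
  simp only [decide_eq_true_eq, Bool.not_eq_true', List.all_eq_false, beq_iff_eq]
  constructor
  · intro h
    by_contra hno
    simp only [not_exists, not_and, not_not] at hno
    have : keys.count t = keys.length := hiff.2 (fun b hb => (hno b hb).symm)
    omega
  · intro h
    rcases Nat.lt_or_ge (keys.count t) keys.length with h1 | h1
    · exact_mod_cast h1
    · exfalso
      obtain ⟨x, hx, hne⟩ := h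
      exact hne ((hiff.1 (le_antisymm hle h1) x hx).symm)

-- A's loop returns false exactly when every stored key equals the target
theorem newEntryLoop_eq_not_all (t : Int × Int × Int × Int) (l : List (Int × Int × Int × Int × Int)) :
    newEntryLoop t l = !(l.all (fun e => (e.1, e.2.1, e.2.2.1, e.2.2.2.1) == t)) := by
  induction l with
  | nil => rfl
  | cons a rest ih =>
    obtain ⟨x1, x2, x3, x4, x5⟩ := a
    by_cases h : (x1, x2, x3, x4) = t <;> simp [newEntryLoop, h, ih]

-- ===== VERDICT (by name: the statement is the Claim_ definition above) =====
theorem new_entry_py_spec : Claim_equal_new_entry_py := by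
  intro ih laddr faddr lport fport ts _
  unfold Spec_new_entry_py new_entry_py new_entry_py_alt
  simp only [PySem.List.count_eq, newEntryLoop_eq_not_all]
  have hall : (ih.all (fun e => (e.1, e.2.1, e.2.2.1, e.2.2.2.1) == (laddr, faddr, lport, fport)))
      = ((ih.map (fun e => (e.1, e.2.1, e.2.2.1, e.2.2.2.1))).all (· == (laddr, faddr, lport, fport))) := by
    rw [List.all_map]; rfl
  rw [hall, ← count_target_lt_len_iff_not_all, List.length_map]
  split_ifs with h
  · simp [h]
  · simp [h]
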